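-- pv_equiv track=rewrite | github.com/HarouneKESSAL/tajweed-modular-assessment | scripts/duration/analyze_surviving_ghunnah_contexts.py | char_window
-- ===== SOURCE A (Python) =====
-- def char_window(chars: list[str], position: int, radius: int = 2) -> str:
--     left = max(0, position - radius)
--     right = min(len(chars), position + radius + 1)
--     window = chars[left:right]
--     center = position - left
--     parts: list[str] = []
--     for idx, ch in enumerate(window):
--         if idx == center:
--             parts.append(f"[{ch}]")
--         else:
--             parts.append(ch)
--     return "".join(parts)
-- ===== SOURCE B (Python) =====
-- def char_window(chars: list[str], position: int, radius: int = 2) -> str: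
--     return "".join(
--         ("[" + ch + "]") if i == position else ch
--         for i, ch in enumerate(chars)
--         if position - radius <= i <= position + radius
--     )
-- ===== Notes on version B (the rewrite author's own statement) =====
-- stated objective: simpler
-- what changed: Replaces A's explicit slice-bound computation (left/right/window/center) and per-window loop by a single filtered generator over enumerate(chars) that keeps the indices within radius of position and brackets the one equal to position.
-- intended difference: When position + radius + 1 < 0 and the list is long enough, A's negative right slice bound wraps around Python-style so A returns the characters chars[max(0,position-radius):len(chars)+position+radius+1] joined (nonempty on D_), while B returns '' -- the window lies entirely left of the array, so an empty window is the intended value. — e.g. on char_window(["a", "b", "c"], -4, 1): A returns "a", B returns ""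
import Mathlib
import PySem

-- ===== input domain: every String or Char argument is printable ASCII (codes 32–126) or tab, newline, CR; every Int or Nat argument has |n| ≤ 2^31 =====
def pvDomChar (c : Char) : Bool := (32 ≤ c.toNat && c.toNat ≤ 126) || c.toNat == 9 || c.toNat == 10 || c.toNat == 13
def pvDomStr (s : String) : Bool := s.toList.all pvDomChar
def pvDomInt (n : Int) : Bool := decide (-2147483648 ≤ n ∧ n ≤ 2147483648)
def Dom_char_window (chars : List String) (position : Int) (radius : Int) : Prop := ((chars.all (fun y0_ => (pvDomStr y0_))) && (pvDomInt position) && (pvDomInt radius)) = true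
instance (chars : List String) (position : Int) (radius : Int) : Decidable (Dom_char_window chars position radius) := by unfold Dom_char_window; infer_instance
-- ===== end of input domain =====

-- B replaces A's slice-bound bookkeeping (left/right/window/center) by one filtered pass over
-- enumerate(chars), bracketing the element whose index equals position; same O(n) cost.

-- ===== PORT A =====
def char_window (chars : List String) (position : Int) (radius : Int) : String :=
  let left := max 0 (position - radius)
  let right := min ((chars.length : Int)) (position + radius + 1)
  let window := PySem.List.slice chars (some left) (some right)
  let center := position - left
  let parts := (PySem.List.enumerate window 0).foldl
    (fun acc p => acc ++ [if p.1 == center then "[" ++ p.2 ++ "]" else p.2]) []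
  PySem.Str.join "" parts

-- ===== PORT B =====
def char_window_alt (chars : List String) (position : Int) (radius : Int) : String :=
  PySem.Str.join ""
    (((PySem.List.enumerate chars 0).filter
        (fun p => decide (position - radius ≤ p.1 ∧ p.1 ≤ position + radius))).map
      (fun p => if p.1 == position then "[" ++ p.2 ++ "]" else p.2))

-- ===== PRECONDITION & SPEC =====
-- When position + radius + 1 < 0 and the list is long enough, A's negative right slice bound
-- wraps around Python-style so A returns chars[max(0,position-radius):len(chars)+position+radius+1]
-- joined (nonempty on D_), while B returns "" — the window lies entirely left of the array, so an
-- empty window is the intended value.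
def D_char_window (chars : List String) (position : Int) (radius : Int) : Prop :=
  position + radius + 1 < 0 ∧
  max 0 (position - radius) < (chars.length : Int) + position + radius + 1 ∧
  ∃ s ∈ (chars.drop (max 0 (position - radius)).toNat).take
      (((chars.length : Int) + position + radius + 1).toNat - (max 0 (position - radius)).toNat),
    s ≠ ""
instance (chars : List String) (position : Int) (radius : Int) : Decidable (D_char_window chars position radius) := by unfold D_char_window; infer_instance

def Spec_char_window (chars : List String) (position : Int) (radius : Int) (out : String) : Prop := ¬ D_char_window chars position radius → out = char_window_alt chars position radius
instance (chars : List String) (position : Int) (radius : Int) (out : String) : Decidable (Spec_char_window chars position radius out) := by unfold Spec_char_window; infer_instance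

def pvDiffWitness_char_window : List String × Int × Int := (["a", "b", "c"], -4, 1)
def pvDiffWitnessOut_char_window : String × String := ("a", "")

-- ===== CLAIM (what is proved, stated in full; the proofs are below) =====
def Claim_unchanged_char_window : Prop := ∀ (chars : List String) (position : Int) (radius : Int), Dom_char_window chars position radius → Spec_char_window chars position radius (char_window chars position radius)
def Claim_changed_char_window : Prop := Dom_char_window (pvDiffWitness_char_window.1) (pvDiffWitness_char_window.2.1) (pvDiffWitness_char_window.2.2) ∧ D_char_window (pvDiffWitness_char_window.1) (pvDiffWitness_char_window.2.1) (pvDiffWitness_char_window.2.2) ∧ char_window (pvDiffWitness_char_window.1) (pvDiffWitness_char_window.2.1) (pvDiffWitness_char_window.2.2) = pvDiffWitnessOut_char_window.1 ∧ char_window_alt (pvDiffWitness_char_window.1) (pvDiffWitness_char_window.2.1) (pvDiffWitness_char_window.2.2) = pvDiffWitnessOut_char_window.2 ∧ pvDiffWitnessOut_char_window.1 ≠ pvDiffWitnessOut_char_window.2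
def Claim_exact_char_window : Prop := ∀ (chars : List String) (position : Int) (radius : Int), Dom_char_window chars position radius → D_char_window chars position radius → char_window chars position radius ≠ char_window_alt chars position radius

-- ===== LEMMAS AND PROOFS =====

-- join with empty separator is concatenation (list level)
lemma chars_join_nil_flatten (l : List (List Char)) : PySem.Chars.join [] l = l.flatten := by
  simp only [PySem.Chars.join, List.intercalate]
  induction l with
  | nil => simp
  | cons a t ih => cases t <;> simp_all [List.intersperse]

lemma join_empty_toList (parts : List String) :
    (PySem.Str.join "" parts).toList = (parts.map String.toList).flatten := by
  simp [PySem.Str.toList_join, chars_join_nil_flatten]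

-- B's filtered enumeration keeps exactly the contiguous index band [lo, hi]
lemma filter_enumerate_band {α : Type} (xs : List α) (lo hi : Int) :
    ∀ k : Int, (PySem.List.enumerate xs k).filter (fun p => decide (lo ≤ p.1 ∧ p.1 ≤ hi))
      = PySem.List.enumerate ((xs.drop (lo - k).toNat).take (hi + 1 - max lo k).toNat) (max lo k) := by
  induction xs with
  | nil => intro k; simp [PySem.List.enumerate_nil]
  | cons x xs ih =>
    intro k
    rw [PySem.List.enumerate_cons]
    simp only [List.filter_cons, decide_eq_true_eq]
    split_ifs with hk
    · rw [ih (k + 1)]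
      have h1 : max lo (k + 1) = k + 1 := by omega
      have h2 : max lo k = k := by omega
      have h3 : (lo - (k + 1)).toNat = 0 := by omega
      have h4 : (lo - k).toNat = 0 := by omega
      have h5 : (hi + 1 - k).toNat = (hi + 1 - (k + 1)).toNat + 1 := by omega
      rw [h1, h2, h3, h4, h5]
      simp [PySem.List.enumerate_cons]
    · rw [ih (k + 1)]
      by_cases hlo : lo ≤ k
      · have ha : (hi + 1 - max lo (k + 1)).toNat = 0 := by omega
        have hb : (hi + 1 - max lo k).toNat = 0 := by omega
        simp [ha, hb, PySem.List.enumerate_nil]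
      · have h1 : max lo (k + 1) = max lo k := by omega
        have h2 : (lo - k).toNat = (lo - (k + 1)).toNat + 1 := by omega
        rw [h1, h2, List.drop_succ_cons]

-- mapping the bracket function over an enumeration brackets exactly the element at index c
lemma parts_eq_gen (w : List String) (s c : Int) :
    (PySem.List.enumerate w s).map (fun p => if p.1 == c then "[" ++ p.2 ++ "]" else p.2)
    = if s ≤ c ∧ c < s + (w.length : Int) then
        w.take (c - s).toNat ++ ("[" ++ w[(c - s).toNat]! ++ "]") :: w.drop ((c - s).toNat + 1)
      else w := by
  split_ifs with h
  · obtain ⟨h0, hlt⟩ := h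
    have hnl : (c - s).toNat < w.length := by omega
    have hsplit : w = w.take (c - s).toNat ++ w[(c - s).toNat] :: w.drop ((c - s).toNat + 1) := by
      conv_lhs => rw [← List.take_append_drop (c - s).toNat w,
        List.drop_eq_getElem_cons hnl]
    have hg : w[(c - s).toNat]! = w[(c - s).toNat] := getElem!_pos w (c - s).toNat hnl
    conv_lhs => rw [hsplit]
    rw [PySem.List.enumerate_append, PySem.List.enumerate_cons, List.map_append, List.map_cons]
    have hlen : (w.take (c - s).toNat).length = (c - s).toNat := by
      simp [List.length_take]; omega
    congr 1
    · rw [List.map_congr_left, PySem.List.map_snd_enumerate]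
      intro p hp
      rcases (PySem.List.mem_enumerate_iff _ _ _).mp hp with ⟨k, hk, rfl⟩
      rw [if_neg]
      simp only [beq_iff_eq]
      rw [hlen] at hk
      omega
    · congr 1
      · rw [if_pos, hg]
        simp only [beq_iff_eq, hlen]
        omega
      · rw [List.map_congr_left, PySem.List.map_snd_enumerate]
        intro p hp
        rcases (PySem.List.mem_enumerate_iff _ _ _).mp hp with ⟨k, hk, rfl⟩
        rw [if_neg]
        simp only [beq_iff_eq, hlen]
        omega
  · rw [List.map_congr_left, PySem.List.map_snd_enumerate]
    intro p hp
    rcases (PySem.List.mem_enumerate_iff _ _ _).mp hp with ⟨k, hk, rfl⟩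
    rw [if_neg]
    simp only [beq_iff_eq]
    omega

-- A's slice, when the right bound is nonnegative, is B's drop/take window
lemma windowA_eq (chars : List String) (position radius : Int) (h : 0 ≤ position + radius + 1) :
    PySem.List.slice chars (some (max 0 (position - radius)))
        (some (min ((chars.length : Int)) (position + radius + 1)))
    = (chars.drop (position - radius - 0).toNat).take
        (position + radius + 1 - max (position - radius) 0).toNat := by
  rw [PySem.List.slice_toNat _ (by omega) (by omega)]
  have hd : (max 0 (position - radius)).toNat = (position - radius - 0).toNat := by omega
  rw [hd]
  apply List.take_eq_take_iff.mpr
  simp only [List.length_drop]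
  omega

-- A's slice with a negative right bound (Python wraparound)
lemma windowA_neg (chars : List String) (position radius : Int) (h : position + radius + 1 < 0) :
    PySem.List.slice chars (some (max 0 (position - radius)))
        (some (min ((chars.length : Int)) (position + radius + 1)))
    = (chars.drop (max 0 (position - radius)).toNat).take
        (((chars.length : Int) + position + radius + 1).toNat - (max 0 (position - radius)).toNat) := by
  have hR : min ((chars.length : Int)) (position + radius + 1) = position + radius + 1 := by omega
  rw [hR]
  simp only [PySem.List.slice]
  have hca : PySem.List.clampIdx chars.length (max 0 (position - radius))
      = min (max 0 (position - radius)).toNat chars.length := by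
    simp only [PySem.List.clampIdx]
    split_ifs <;> omega
  have hcb : PySem.List.clampIdx chars.length (position + radius + 1)
      = ((chars.length : Int) + position + radius + 1).toNat := by
    simp only [PySem.List.clampIdx]
    split_ifs <;> omega
  rw [hca, hcb]
  by_cases hL : (max 0 (position - radius)).toNat ≤ chars.length
  · rw [min_eq_left hL]
  · have h1 : min (max 0 (position - radius)).toNat chars.length = chars.length := by omega
    rw [h1]
    rw [List.drop_length, List.drop_eq_nil_of_le (by omega)]
    simp

-- B returns "" whenever the whole index band is negative
lemma alt_neg (chars : List String) (position radius : Int) (h : position + radius + 1 < 0) :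
    char_window_alt chars position radius = "" := by
  unfold char_window_alt
  have hf : (PySem.List.enumerate chars 0).filter
      (fun p => decide (position - radius ≤ p.1 ∧ p.1 ≤ position + radius)) = [] := by
    apply List.filter_eq_nil_iff.mpr
    intro p hp
    rcases (PySem.List.mem_enumerate_iff _ _ _).mp hp with ⟨k, hk, rfl⟩
    simp only [decide_eq_true_eq, not_and]
    intro _
    omega
  rw [hf]
  simp only [List.map_nil]
  decide

-- A, when the right bound is negative, joins the wrapped window with no bracket
lemma a_neg (chars : List String) (position radius : Int) (h : position + radius + 1 < 0) :
    char_window chars position radius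
    = PySem.Str.join "" ((chars.drop (max 0 (position - radius)).toNat).take
        (((chars.length : Int) + position + radius + 1).toNat - (max 0 (position - radius)).toNat)) := by
  simp only [char_window]
  rw [windowA_neg _ _ _ h, PySem.List.foldl_append_singleton_eq_map, List.nil_append,
    parts_eq_gen, if_neg (by omega)]

-- ===== VERDICT (by name: the statements are the Claim_ definitions above) =====
theorem char_window_spec : Claim_unchanged_char_window := by
  intro chars position radius _
  unfold Spec_char_window
  intro hnD
  by_cases hR : 0 ≤ position + radius + 1
  · simp only [char_window, char_window_alt]
    rw [PySem.List.foldl_append_singleton_eq_map, List.nil_append,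
      filter_enumerate_band, windowA_eq _ _ _ hR, parts_eq_gen, parts_eq_gen]
    congr 1
    have hn : (position - max 0 (position - radius) - 0).toNat
        = (position - max (position - radius) 0).toNat := by omega
    apply if_congr _ (by rw [hn]) rfl
    constructor <;> intro <;> constructor <;> omega
  · rw [alt_neg _ _ _ (by omega), a_neg _ _ _ (by omega)]
    unfold D_char_window at hnD
    by_cases hc2 : max 0 (position - radius) < (chars.length : Int) + position + radius + 1
    · have hc3 : ∀ s ∈ (chars.drop (max 0 (position - radius)).toNat).take
          (((chars.length : Int) + position + radius + 1).toNat - (max 0 (position - radius)).toNat),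
          s = "" := by
        intro s hs
        by_contra hne
        exact hnD ⟨by omega, hc2, s, hs, hne⟩
      apply String.toList_inj.mp
      rw [join_empty_toList]
      show _ = ("" : String).toList
      apply List.flatten_eq_nil_iff.mpr
      intro l hl
      rcases List.mem_map.mp hl with ⟨s, hs, rfl⟩
      rw [hc3 s hs]
      rfl
    · have h0 : (((chars.length : Int) + position + radius + 1).toNat
          - (max 0 (position - radius)).toNat) = 0 := by omega
      rw [h0, List.take_zero]
      decide

theorem char_window_changed : Claim_changed_char_window := by
  unfold Claim_changed_char_window; decide

theorem char_window_tight : Claim_exact_char_window := by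
  intro chars position radius _ hd
  obtain ⟨h1, h2, s, hs, hsne⟩ := hd
  rw [a_neg _ _ _ h1, alt_neg _ _ _ h1]
  intro heq
  have ht := congrArg String.toList heq
  rw [join_empty_toList] at ht
  have hmem : String.toList s ∈ ((chars.drop (max 0 (position - radius)).toNat).take
      (((chars.length : Int) + position + radius + 1).toNat - (max 0 (position - radius)).toNat)).map
        String.toList := List.mem_map_of_mem hs
  have hnil : String.toList s = [] := List.flatten_eq_nil_iff.mp ht _ hmem
  exact hsne (String.toList_inj.mp hnil)
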